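-- pv_equiv track=rewrite | github.com/ConGustoAI/friendlly | friendlly/core.py | parse_cell
-- ===== SOURCE A (Python) =====
-- from typing import List, Dict, Tuple
--
-- def parse_cell(
--     cell: str # The raw body of the cell
-- ) -> Tuple[List[Dict[str, str]], int]:
--     """
--     A single cell can contain multiple messages.
--     A message is either a user message (starts with %fr) or a bot message (starts with #).
--     Both can be multiline.
--
--     Returns: a list of messages (with 'role' and 'content') and the number of %fr magics in the cell
--     """
--     parsed_lines = []
--     num_magic = 0
--     for line in cell.split('\n'):
--         if line.startswith('%fr'):
--             message = {'role': 'user', 'content': line[3:].strip()}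
--             num_magic += 1
--         elif line.strip().startswith('#'):
--             message = {'role': 'assistant', 'content': line[1:].strip()}
--         else: continue
--
--         if not parsed_lines or parsed_lines[-1]['role'] != message['role']:
--             parsed_lines.append(message)
--         else:
--             parsed_lines[-1]['content'] += ("\n" + message['content'])
--
--     return parsed_lines, num_magic
-- ===== SOURCE B (Python) =====
-- def parse_cell(cell):
--     # pass 1: tag matching lines as (role, content), counting %fr magics
--     tagged = []
--     num_magic = 0
--     for line in cell.split('\n'):
--         if line.startswith('%fr'):
--             tagged.append(('user', line[3:].strip()))
--             num_magic += 1
--         elif line.strip().startswith('#'):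
--             tagged.append(('assistant', line[1:].strip()))
--     # pass 2: collapse consecutive same-role runs, joining contents with '\n'
--     messages = []
--     i = 0
--     n = len(tagged)
--     while i < n:
--         role = tagged[i][0]
--         j = i
--         while j < n and tagged[j][0] == role:
--             j += 1
--         messages.append({'role': role, 'content': '\n'.join(c for _, c in tagged[i:j])})
--         i = j
--     return messages, num_magic
-- ===== Notes on version B (the rewrite author's own statement) =====
-- stated objective: alternative
-- what changed: A merges each matching line into the growing message list as it scans (mutating the last dict); B first tags matching lines as (role, content) pairs in one pass, then a second phase collapses consecutive same-role runs, joining their contents with newlines.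
import Mathlib
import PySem

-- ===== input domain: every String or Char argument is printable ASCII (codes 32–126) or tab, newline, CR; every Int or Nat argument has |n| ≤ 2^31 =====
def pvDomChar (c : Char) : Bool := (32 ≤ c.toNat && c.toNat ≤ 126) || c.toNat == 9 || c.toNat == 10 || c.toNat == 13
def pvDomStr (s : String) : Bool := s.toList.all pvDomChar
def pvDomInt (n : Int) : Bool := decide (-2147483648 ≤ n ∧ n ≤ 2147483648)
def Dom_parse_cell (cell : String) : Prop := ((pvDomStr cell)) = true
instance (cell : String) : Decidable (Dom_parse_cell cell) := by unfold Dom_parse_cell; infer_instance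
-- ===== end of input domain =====

-- B re-decomposes A's single stateful merge-as-you-go loop into two phases (tag matching
-- lines, then collapse consecutive same-role runs by joining with '\n'); objective: alternative.

-- ===== PORT A =====
-- 'if not parsed_lines or parsed_lines[-1]['role'] != message['role']: append else merge into last'
def pvAppendA (parsed : List (PySem.Dict String String)) (message : PySem.Dict String String) :
    List (PySem.Dict String String) :=
  match parsed.getLast? with
  | none => parsed ++ [message]
  | some last =>
      if PySem.Dict.getD last "role" "" ≠ PySem.Dict.getD message "role" "" then
        parsed ++ [message]
      else
        parsed.dropLast ++
          [PySem.Dict.modify last "content" "" (fun c => c ++ ("\n" ++ PySem.Dict.getD message "content" ""))]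

def parse_cell (cell : String) : (List (List (String × String))) × Int :=
  let st := ((PySem.Str.split? cell "\n").getD []).foldl
    (fun (st : List (PySem.Dict String String) × Int) line =>
      if PySem.Str.startswith line "%fr" then
        (pvAppendA st.1 ⟨[("role", "user"), ("content", PySem.Str.strip (PySem.Str.slice line (some 3) none))]⟩,
         st.2 + 1)
      else if PySem.Str.startswith (PySem.Str.strip line) "#" then
        (pvAppendA st.1 ⟨[("role", "assistant"), ("content", PySem.Str.strip (PySem.Str.slice line (some 1) none))]⟩,
         st.2)
      else st) ([], 0)
  (st.1.map PySem.Dict.items, st.2)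

-- ===== PORT B =====
-- pass 2 of Source B: the while loop collapsing consecutive same-role runs (takeWhile/dropWhile = the inner 'while j < n and tagged[j][0] == role')
def pvGroupRuns : List (String × String) → List (List (String × String))
  | [] => []
  | (r, c) :: t =>
      [("role", r), ("content", PySem.Str.join "\n" (c :: (t.takeWhile (fun p => p.1 == r)).map Prod.snd))]
        :: pvGroupRuns (t.dropWhile (fun p => p.1 == r))
  termination_by t => t.length
  decreasing_by
    have := List.length_dropWhile_le (p := fun p : String × String => p.1 == r) (l := t)
    simp; omega

def parse_cell_alt (cell : String) : (List (List (String × String))) × Int :=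
  let st := ((PySem.Str.split? cell "\n").getD []).foldl
    (fun (st : List (String × String) × Int) line =>
      if PySem.Str.startswith line "%fr" then
        (st.1 ++ [("user", PySem.Str.strip (PySem.Str.slice line (some 3) none))], st.2 + 1)
      else if PySem.Str.startswith (PySem.Str.strip line) "#" then
        (st.1 ++ [("assistant", PySem.Str.strip (PySem.Str.slice line (some 1) none))], st.2)
      else st) ([], 0)
  (pvGroupRuns st.1, st.2)

-- ===== PRECONDITION & SPEC =====
def Spec_parse_cell (cell : String) (out : (List (List (String × String))) × Int) : Prop := out = parse_cell_alt cell
instance (cell : String) (out : (List (List (String × String))) × Int) : Decidable (Spec_parse_cell cell out) := by unfold Spec_parse_cell; infer_instance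

-- ===== CLAIM (what is proved, stated in full; the proofs are below) =====
def Claim_equal_parse_cell : Prop := ∀ (cell : String), Dom_parse_cell cell → Spec_parse_cell cell (parse_cell cell)

-- ===== LEMMAS AND PROOFS =====

-- proof-side: the per-line classification both ports perform
def pvClassify (line : String) : Option (String × String) :=
  if PySem.Str.startswith line "%fr" then
    some ("user", PySem.Str.strip (PySem.Str.slice line (some 3) none))
  else if PySem.Str.startswith (PySem.Str.strip line) "#" then
    some ("assistant", PySem.Str.strip (PySem.Str.slice line (some 1) none))
  else none

-- proof-side: A's merge loop restarted from a last message (r, c)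
def pvMergeInto (r c : String) : List (String × String) → List (PySem.Dict String String)
  | [] => [⟨[("role", r), ("content", c)]⟩]
  | (r', c') :: t =>
      if r' = r then pvMergeInto r (c ++ ("\n" ++ c')) t
      else (⟨[("role", r), ("content", c)]⟩ : PySem.Dict String String) :: pvMergeInto r' c' t

theorem pv_join_singleton (c : String) : PySem.Str.join "\n" [c] = c := by
  apply String.ext
  simp [PySem.Str.toList_join, PySem.Chars.join_singleton]

theorem pv_join_merge (a b : String) (cs : List String) :
    PySem.Str.join "\n" ((a ++ ("\n" ++ b)) :: cs) = PySem.Str.join "\n" (a :: b :: cs) := by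
  apply String.ext
  cases cs with
  | nil =>
      simp [PySem.Str.toList_join, PySem.Chars.join_singleton, PySem.Chars.join_cons_cons]
  | cons d ds =>
      simp [PySem.Str.toList_join, PySem.Chars.join_cons_cons]

theorem pv_getD_role (r c : String) :
    PySem.Dict.getD (⟨[("role", r), ("content", c)]⟩ : PySem.Dict String String) "role" "" = r := by
  simp [PySem.Dict.getD, PySem.Dict.get?, List.find?]

theorem pv_modify_content (r c : String) (f : String → String) :
    PySem.Dict.modify (⟨[("role", r), ("content", c)]⟩ : PySem.Dict String String) "content" "" f
      = ⟨[("role", r), ("content", f c)]⟩ := by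
  simp [PySem.Dict.modify, PySem.Dict.insert, PySem.Dict.getD, PySem.Dict.get?, List.find?]

theorem pv_getD_content (r c : String) :
    PySem.Dict.getD (⟨[("role", r), ("content", c)]⟩ : PySem.Dict String String) "content" "" = c := by
  simp [PySem.Dict.getD, PySem.Dict.get?, List.find?]

-- A's fold = merge-fold over the classified lines, plus the '%fr' count
theorem pv_foldA (lines : List String) (p : List (PySem.Dict String String)) (n : Int) :
    lines.foldl
      (fun (st : List (PySem.Dict String String) × Int) line =>
        if PySem.Str.startswith line "%fr" then
          (pvAppendA st.1 ⟨[("role", "user"), ("content", PySem.Str.strip (PySem.Str.slice line (some 3) none))]⟩,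
           st.2 + 1)
        else if PySem.Str.startswith (PySem.Str.strip line) "#" then
          (pvAppendA st.1 ⟨[("role", "assistant"), ("content", PySem.Str.strip (PySem.Str.slice line (some 1) none))]⟩,
           st.2)
        else st) (p, n)
    = ((lines.filterMap pvClassify).foldl
         (fun ps rc => pvAppendA ps ⟨[("role", rc.1), ("content", rc.2)]⟩) p,
       n + (lines.countP (fun l => PySem.Str.startswith l "%fr") : Int)) := by
  induction lines generalizing p n with
  | nil => simp
  | cons l t ih =>
      by_cases h1 : PySem.Str.startswith l "%fr" = true
      · have hc : pvClassify l = some ("user", PySem.Str.strip (PySem.Str.slice l (some 3) none)) := by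
          unfold pvClassify; rw [if_pos h1]
        rw [List.foldl_cons, if_pos h1, ih, List.filterMap_cons, hc, List.foldl_cons,
          List.countP_cons, if_pos h1]
        simp only [Prod.mk.injEq]
        exact ⟨trivial, by push_cast; ring⟩
      · by_cases h2 : PySem.Str.startswith (PySem.Str.strip l) "#" = true
        · have hc : pvClassify l = some ("assistant", PySem.Str.strip (PySem.Str.slice l (some 1) none)) := by
            unfold pvClassify; rw [if_neg h1, if_pos h2]
          rw [List.foldl_cons, if_neg h1, if_pos h2, ih, List.filterMap_cons, hc, List.foldl_cons,
            List.countP_cons, if_neg h1]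
          simp only [Prod.mk.injEq]
          exact ⟨trivial, by push_cast; ring⟩
        · have hc : pvClassify l = none := by unfold pvClassify; rw [if_neg h1, if_neg h2]
          rw [List.foldl_cons, if_neg h1, if_neg h2, ih, List.filterMap_cons, hc,
            List.countP_cons, if_neg h1]
          simp only [Prod.mk.injEq]
          exact ⟨trivial, by push_cast; ring⟩

-- B's tagging fold = append of the classified lines, plus the '%fr' count
theorem pv_foldB (lines : List String) (q : List (String × String)) (n : Int) :
    lines.foldl
      (fun (st : List (String × String) × Int) line =>
        if PySem.Str.startswith line "%fr" then
          (st.1 ++ [("user", PySem.Str.strip (PySem.Str.slice line (some 3) none))], st.2 + 1)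
        else if PySem.Str.startswith (PySem.Str.strip line) "#" then
          (st.1 ++ [("assistant", PySem.Str.strip (PySem.Str.slice line (some 1) none))], st.2)
        else st) (q, n)
    = (q ++ lines.filterMap pvClassify,
       n + (lines.countP (fun l => PySem.Str.startswith l "%fr") : Int)) := by
  induction lines generalizing q n with
  | nil => simp
  | cons l t ih =>
      by_cases h1 : PySem.Str.startswith l "%fr" = true
      · have hc : pvClassify l = some ("user", PySem.Str.strip (PySem.Str.slice l (some 3) none)) := by
          unfold pvClassify; rw [if_pos h1]
        rw [List.foldl_cons, if_pos h1, ih, List.filterMap_cons, hc,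
          List.countP_cons, if_pos h1]
        simp only [Prod.mk.injEq, List.append_assoc, List.singleton_append]
        exact ⟨trivial, by push_cast; ring⟩
      · by_cases h2 : PySem.Str.startswith (PySem.Str.strip l) "#" = true
        · have hc : pvClassify l = some ("assistant", PySem.Str.strip (PySem.Str.slice l (some 1) none)) := by
            unfold pvClassify; rw [if_neg h1, if_pos h2]
          rw [List.foldl_cons, if_neg h1, if_pos h2, ih, List.filterMap_cons, hc,
            List.countP_cons, if_neg h1]
          simp only [Prod.mk.injEq, List.append_assoc, List.singleton_append]
          exact ⟨trivial, by push_cast; ring⟩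
        · have hc : pvClassify l = none := by unfold pvClassify; rw [if_neg h1, if_neg h2]
          rw [List.foldl_cons, if_neg h1, if_neg h2, ih, List.filterMap_cons, hc,
            List.countP_cons, if_neg h1]
          simp only [Prod.mk.injEq]
          exact ⟨trivial, by push_cast; ring⟩

-- A's merge loop, started just after appending (r, c), is pvMergeInto
theorem pv_merge_fold (t : List (String × String)) (acc : List (PySem.Dict String String)) (r c : String) :
    t.foldl (fun ps rc => pvAppendA ps ⟨[("role", rc.1), ("content", rc.2)]⟩)
        (acc ++ [⟨[("role", r), ("content", c)]⟩])
      = acc ++ pvMergeInto r c t := by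
  induction t generalizing acc r c with
  | nil => simp [pvMergeInto]
  | cons hd t ih =>
      obtain ⟨r', c'⟩ := hd
      simp only [List.foldl_cons, pvMergeInto]
      by_cases h : r' = r
      · subst h
        have : pvAppendA (acc ++ [⟨[("role", r'), ("content", c)]⟩]) ⟨[("role", r'), ("content", c')]⟩
            = acc ++ [⟨[("role", r'), ("content", c ++ ("\n" ++ c'))]⟩] := by
          simp [pvAppendA, pv_getD_role, pv_getD_content, pv_modify_content]
        rw [this, ih, if_pos rfl]
      · have : pvAppendA (acc ++ [⟨[("role", r), ("content", c)]⟩]) ⟨[("role", r'), ("content", c')]⟩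
            = (acc ++ [⟨[("role", r), ("content", c)]⟩]) ++ [⟨[("role", r'), ("content", c')]⟩] := by
          simp only [pvAppendA, List.getLast?_concat, pv_getD_role]
          rw [if_pos (by simpa using fun hrr => h hrr.symm)]
        rw [this, ih, if_neg h]
        simp

-- pvMergeInto produces exactly B's run-grouping
theorem pv_merge_group (t : List (String × String)) (r c : String) :
    (pvMergeInto r c t).map PySem.Dict.items
      = [("role", r), ("content", PySem.Str.join "\n" (c :: (t.takeWhile (fun p => p.1 == r)).map Prod.snd))]
          :: pvGroupRuns (t.dropWhile (fun p => p.1 == r)) := by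
  induction t generalizing r c with
  | nil => simp [pvMergeInto, pvGroupRuns, pv_join_singleton]
  | cons hd t ih =>
      obtain ⟨r', c'⟩ := hd
      by_cases h : r' = r
      · subst h
        simp only [pvMergeInto, List.takeWhile_cons, List.dropWhile_cons,
          beq_self_eq_true, if_true, List.map_cons]
        rw [ih]
        rw [pv_join_merge]
      · have hb : ((r' == r) = false) := beq_eq_false_iff_ne.mpr h
        simp only [pvMergeInto, if_neg h, List.takeWhile_cons, List.dropWhile_cons, hb,
          Bool.false_eq_true, if_false, List.map_cons, List.map_nil]
        rw [ih]
        conv_rhs => rw [pvGroupRuns]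
        simp [pv_join_singleton]

-- ===== VERDICT (by name: the statement is the Claim_ definition above) =====
theorem parse_cell_spec : Claim_equal_parse_cell := by
  intro cell _
  unfold Spec_parse_cell parse_cell parse_cell_alt
  rw [pv_foldA _ [] 0, pv_foldB _ [] 0]
  simp only [List.nil_append]
  cases htag : ((PySem.Str.split? cell "\n").getD []).filterMap pvClassify with
  | nil => simp [pvGroupRuns]
  | cons hd t =>
      obtain ⟨r, c⟩ := hd
      simp only [List.foldl_cons]
      have h0 : pvAppendA [] ⟨[("role", r), ("content", c)]⟩
          = [] ++ [⟨[("role", r), ("content", c)]⟩] := by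
        simp [pvAppendA]
      rw [h0, pv_merge_fold, List.nil_append, pv_merge_group]
      conv_rhs => rw [pvGroupRuns]
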